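-- pv_equiv track=rewrite | github.com/mpiposanchez-git/vendinsights | backend/insights_function/kpi_calculations.py | units_sold_per_slot
-- ===== SOURCE A (Python) =====
-- from collections import defaultdict
-- from typing import Iterable, Mapping, Any
--
-- Telemetry = Mapping[str, Any]
--
-- def units_sold_per_slot(docs: Iterable[Telemetry]) -> Mapping[str, int]:
--     """Number of items sold per inventory slot.
--
--     This assumes telemetry documents include an "inventory" mapping of
--     `slot -> remaining_quantity`.  A caller is responsible for providing
--     chronologically ordered docs so that differences can be computed.
--     """
--     counter: defaultdict[str, int] = defaultdict(int)
--     prev_inventory: dict[str, int] | None = None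
--
--     for doc in docs:
--         inv = doc.get("inventory")
--         if inv is None:
--             continue
--         if prev_inventory is not None:
--             for slot, qty in inv.items():
--                 prev_qty = prev_inventory.get(slot, qty)
--                 sold = max(prev_qty - qty, 0)
--                 counter[slot] += sold
--         prev_inventory = dict(inv)
--
--     return counter
-- ===== SOURCE B (Python) =====
-- from collections import defaultdict
--
--
-- def units_sold_per_slot(docs):
--     """Slot-major group-by: flatten all (slot, sold) events of consecutive
--     snapshot pairs into one list, then aggregate per distinct slot."""
--     invs = [d["inventory"] for d in docs if d.get("inventory") is not None]
--     events = [(slot, max(prev.get(slot, qty) - qty, 0))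
--               for prev, cur in zip(invs, invs[1:])
--               for slot, qty in cur.items()]
--     counter = defaultdict(int)
--     for slot in dict.fromkeys(s for s, _ in events):
--         counter[slot] = sum(v for s, v in events if s == slot)
--     return counter
-- ===== Notes on version B (the rewrite author's own statement) =====
-- stated objective: alternative
-- what changed: Replaced A's streaming defaultdict accumulation threaded with a prev_inventory state by a staged slot-major group-by: flatten all (slot, sold) drop events of consecutive snapshots into one list, then for each distinct slot (first-appearance order) sum its events.
import Mathlib
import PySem

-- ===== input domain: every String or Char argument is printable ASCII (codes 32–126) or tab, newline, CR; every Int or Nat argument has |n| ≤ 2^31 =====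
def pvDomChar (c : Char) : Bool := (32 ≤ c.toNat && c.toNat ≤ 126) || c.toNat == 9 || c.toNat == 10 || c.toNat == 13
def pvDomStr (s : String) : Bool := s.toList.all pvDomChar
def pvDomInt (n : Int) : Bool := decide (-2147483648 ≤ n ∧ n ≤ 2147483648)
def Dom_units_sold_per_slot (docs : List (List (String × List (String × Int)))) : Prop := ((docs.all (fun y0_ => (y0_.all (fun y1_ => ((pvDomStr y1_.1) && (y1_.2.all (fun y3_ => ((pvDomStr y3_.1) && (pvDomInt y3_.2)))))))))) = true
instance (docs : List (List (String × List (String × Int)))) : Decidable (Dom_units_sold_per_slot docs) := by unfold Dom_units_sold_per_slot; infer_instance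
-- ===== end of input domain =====

-- B replaces A's streaming defaultdict/prev_inventory accumulator by a staged
-- slot-major group-by over a flattened list of (slot, sold) events (objective: alternative).


-- ===== PORT A =====
-- A threads (counter, prev_inventory) through one fold over docs; 'continue' on a
-- missing "inventory" key keeps the state unchanged.
def units_sold_per_slot (docs : List (List (String × List (String × Int)))) : List (String × Int) :=
  let final := docs.foldl
    (fun (st : PySem.Dict String Int × Option (PySem.Dict String Int)) doc =>
      match (PySem.Dict.ofList doc).get? "inventory" with
      | none => st
      | some inv =>
        let invD := PySem.Dict.ofList inv
        let counter :=
          match st.2 with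
          | none => st.1
          | some prev =>
            invD.items.foldl
              (fun c sq =>
                let prevQty := prev.getD sq.1 sq.2
                let sold := max (prevQty - sq.2) 0
                c.modify sq.1 0 (· + sold))
              st.1
        (counter, some invD))
    (PySem.Dict.empty, none)
  final.1.items

-- ===== PORT B =====
-- B: flatten all (slot, sold) events of consecutive snapshots into one list,
-- then for each distinct slot (first-appearance order, dict.fromkeys = dedup)
-- sum that slot's events.
def units_sold_per_slot_alt (docs : List (List (String × List (String × Int)))) : List (String × Int) :=
  let invs := docs.filterMap
    (fun doc => ((PySem.Dict.ofList doc).get? "inventory").map PySem.Dict.ofList)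
  let events := (invs.zip (invs.drop 1)).flatMap
    (fun pc => pc.2.items.map (fun sq => (sq.1, max (pc.1.getD sq.1 sq.2 - sq.2) 0)))
  ((PySem.List.dedup (events.map (·.1))).foldl
    (fun c s => c.insert s (((events.filter (fun p => p.1 == s)).map (·.2)).sum))
    PySem.Dict.empty).items

-- ===== PRECONDITION & SPEC =====
def Spec_units_sold_per_slot (docs : List (List (String × List (String × Int)))) (out : List (String × Int)) : Prop := out = units_sold_per_slot_alt docs
instance (docs : List (List (String × List (String × Int)))) (out : List (String × Int)) : Decidable (Spec_units_sold_per_slot docs out) := by unfold Spec_units_sold_per_slot; infer_instance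

-- ===== CLAIM (what is proved, stated in full; the proofs are below) =====
def Claim_equal_units_sold_per_slot : Prop := ∀ (docs : List (List (String × List (String × Int)))), Dom_units_sold_per_slot docs → Spec_units_sold_per_slot docs (units_sold_per_slot docs)

-- ===== LEMMAS AND PROOFS =====

-- A's fold body.
def pvStepA (st : PySem.Dict String Int × Option (PySem.Dict String Int))
    (doc : List (String × List (String × Int))) :
    PySem.Dict String Int × Option (PySem.Dict String Int) :=
  match (PySem.Dict.ofList doc).get? "inventory" with
  | none => st
  | some inv =>
    let invD := PySem.Dict.ofList inv
    let counter :=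
      match st.2 with
      | none => st.1
      | some prev =>
        invD.items.foldl
          (fun c sq =>
            let prevQty := prev.getD sq.1 sq.2
            let sold := max (prevQty - sq.2) 0
            c.modify sq.1 0 (· + sold))
          st.1
    (counter, some invD)

-- The per-pair inner loop of A.
def pvStep (prev cur c : PySem.Dict String Int) : PySem.Dict String Int :=
  cur.items.foldl
    (fun c sq => c.modify sq.1 0 (· + max (prev.getD sq.1 sq.2 - sq.2) 0)) c

def pvLoopPairs (invs : List (PySem.Dict String Int)) (c : PySem.Dict String Int) : PySem.Dict String Int :=
  ((invs.zip (invs.drop 1)).foldl (fun c pc => pvStep pc.1 pc.2 c) c)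

theorem pvLoopPairs_cons_cons (a b : PySem.Dict String Int) (l : List (PySem.Dict String Int))
    (c : PySem.Dict String Int) : pvLoopPairs (a :: b :: l) c = pvLoopPairs (b :: l) (pvStep a b c) := rfl

def pvInvs (docs : List (List (String × List (String × Int)))) : List (PySem.Dict String Int) :=
  docs.filterMap (fun doc => ((PySem.Dict.ofList doc).get? "inventory").map PySem.Dict.ofList)

def pvOptCons : Option (PySem.Dict String Int) → List (PySem.Dict String Int) → List (PySem.Dict String Int)
  | none, l => l
  | some p, l => p :: l

-- Invariant: A's threaded fold equals the pairwise fold over the snapshot list.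
theorem pvMain (docs : List (List (String × List (String × Int))))
    (c : PySem.Dict String Int) (prev : Option (PySem.Dict String Int)) :
    (docs.foldl pvStepA (c, prev)).1 = pvLoopPairs (pvOptCons prev (pvInvs docs)) c := by
  induction docs generalizing c prev with
  | nil =>
    cases prev <;> simp [pvInvs, pvOptCons, pvLoopPairs]
  | cons doc docs ih =>
    have hInvs : pvInvs (doc :: docs)
        = pvOptCons (((PySem.Dict.ofList doc).get? "inventory").map PySem.Dict.ofList) (pvInvs docs) := by
      cases h : (PySem.Dict.ofList doc).get? "inventory" <;>
        simp [pvInvs, pvOptCons, h]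
    simp only [List.foldl_cons]
    cases h : (PySem.Dict.ofList doc).get? "inventory" with
    | none =>
      rw [hInvs]; simp only [h, Option.map_none]
      cases prev with
      | none => simpa [pvStepA, h, pvOptCons] using ih c none
      | some p => simpa [pvStepA, h, pvOptCons] using ih c (some p)
    | some inv =>
      rw [hInvs]; simp only [h, Option.map_some]
      cases prev with
      | none =>
        have : pvStepA (c, none) doc = (c, some (PySem.Dict.ofList inv)) := by
          simp [pvStepA, h]
        rw [this, ih]; rfl
      | some p =>
        have : pvStepA (c, some p) doc
            = (pvStep p (PySem.Dict.ofList inv) c, some (PySem.Dict.ofList inv)) := by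
          simp [pvStepA, pvStep, h]
        rw [this, ih]
        simp [pvOptCons, pvLoopPairs_cons_cons]

-- The event list B builds.
def pvEvents (invs : List (PySem.Dict String Int)) : List (String × Int) :=
  (invs.zip (invs.drop 1)).flatMap
    (fun pc => pc.2.items.map (fun sq => (sq.1, max (pc.1.getD sq.1 sq.2 - sq.2) 0)))

def pvModFold (l : List (String × Int)) (d : PySem.Dict String Int) : PySem.Dict String Int :=
  l.foldl (fun d p => d.modify p.1 0 (· + p.2)) d

-- A's pairwise fold is the modify-fold over the flattened event list.
theorem pvPairs_eq_modFold (invs : List (PySem.Dict String Int)) (c : PySem.Dict String Int) :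
    pvLoopPairs invs c = pvModFold (pvEvents invs) c := by
  have key : ∀ (ps : List (PySem.Dict String Int × PySem.Dict String Int)) (c : PySem.Dict String Int),
      ps.foldl (fun c pc => pvStep pc.1 pc.2 c) c
        = pvModFold (ps.flatMap (fun pc => pc.2.items.map (fun sq => (sq.1, max (pc.1.getD sq.1 sq.2 - sq.2) 0)))) c := by
    intro ps
    induction ps with
    | nil => intro c; rfl
    | cons pc ps ih =>
      intro c
      simp only [List.foldl_cons, List.flatMap_cons]
      rw [ih]
      unfold pvModFold
      rw [List.foldl_append, List.foldl_map]
      rfl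
  exact key _ c

theorem pvGetD_modFold (l : List (String × Int)) (d : PySem.Dict String Int) (k : String) :
    (pvModFold l d).getD k 0 = d.getD k 0 + ((l.filter (fun p => p.1 == k)).map (·.2)).sum := by
  induction l generalizing d with
  | nil => simp [pvModFold]
  | cons p l ih =>
    unfold pvModFold
    simp only [List.foldl_cons]
    rw [show (l.foldl (fun d p => d.modify p.1 0 (· + p.2)) (d.modify p.1 0 (· + p.2))) = pvModFold l (d.modify p.1 0 (· + p.2)) from rfl, ih]
    by_cases h : p.1 = k
    · subst h
      simp [PySem.Dict.getD_modify_self]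
      ring
    · rw [PySem.Dict.getD_modify_of_ne _ _ _ (fun he => h he.symm)]
      simp [h]

-- ===== VERDICT (by name: the statement is the Claim_ definition above) =====
theorem units_sold_per_slot_spec : Claim_equal_units_sold_per_slot := by
  intro docs _
  show units_sold_per_slot docs = units_sold_per_slot_alt docs
  have hA : units_sold_per_slot docs = (pvModFold (pvEvents (pvInvs docs)) PySem.Dict.empty).items := by
    show (docs.foldl pvStepA (PySem.Dict.empty, none)).1.items = _
    rw [pvMain docs PySem.Dict.empty none, pvPairs_eq_modFold]
    rfl
  rw [hA]
  -- characterize both sides as slots.map (fun s => (s, total s))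
  set events := pvEvents (pvInvs docs) with hev
  have hnodup : (pvModFold events PySem.Dict.empty).keys.Nodup := by
    unfold pvModFold
    exact PySem.Dict.nodup_keys_foldl_modify_key events (·.1) 0 (fun d p => (· + p.2)) _ (by simp [PySem.Dict.keys_empty])
  have hkeys : (pvModFold events PySem.Dict.empty).keys = PySem.Set.ofList (events.map (·.1)) := by
    unfold pvModFold
    rw [PySem.Dict.keys_foldl_modify_key events (·.1) 0 (fun d p => (· + p.2)) PySem.Dict.empty]
    simp [PySem.Dict.keys_empty, PySem.Set.update_nil_left]
  have hItemsA : (pvModFold events PySem.Dict.empty).items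
      = (PySem.Set.ofList (events.map (·.1))).map
          (fun s => (s, ((events.filter (fun p => p.1 == s)).map (·.2)).sum)) := by
    rw [PySem.Dict.items_eq_map_keys _ hnodup 0, hkeys]
    apply List.map_congr_left
    intro s _
    rw [pvGetD_modFold]
    simp [PySem.Dict.getD_empty]
  rw [hItemsA]
  -- B side
  show _ = ((PySem.List.dedup (events.map (·.1))).foldl
    (fun c s => c.insert s (((events.filter (fun p => p.1 == s)).map (·.2)).sum))
    PySem.Dict.empty).items
  rw [PySem.List.dedup_eq_ofList]
  have hB := PySem.Dict.items_foldl_insert_fresh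
      (PySem.Set.ofList (events.map (·.1))) (fun a => a)
      (fun s => ((events.filter (fun p => p.1 == s)).map (·.2)).sum) PySem.Dict.empty
      (fun a _ => PySem.Dict.contains_empty a)
      (by simp [PySem.Set.nodup_ofList])
  simp only at hB
  rw [hB]
  rfl
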